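-- pv_equiv track=rewrite | github.com/iree-org/iree | build_tools/wasm/wasm_binary_bundler.py | _strip_exports
-- ===== SOURCE A (Python) =====
-- def _strip_exports(source):
--     """Strips ESM export syntax from source, returning plain JS declarations."""
--     lines = source.split("\n")
--     output_lines = []
--     for line in lines:
--         stripped = line.lstrip()
--         if stripped.startswith("export function "):
--             line = line.replace("export function ", "function ", 1)
--         elif stripped.startswith("export default function "):
--             line = line.replace("export default function ", "function ", 1)
--         elif stripped.startswith("export const "):
--             line = line.replace("export const ", "const ", 1)
--         elif stripped.startswith("export class "):
--             line = line.replace("export class ", "class ", 1)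
--         elif stripped.startswith("export {"):
--             continue
--         output_lines.append(line)
--     return "\n".join(output_lines)
-- ===== SOURCE B (Python) =====
-- def _strip_exports(source):
--     """Strips ESM export syntax from source, returning plain JS declarations."""
--     keep = []
--     for line in source.split("\n"):
--         stripped = line.lstrip()
--         ws = line[:len(line) - len(stripped)]
--         if stripped.startswith("export "):
--             rest = stripped[7:]
--             if rest.startswith("{"):
--                 continue
--             if rest.startswith("default function "):
--                 rest = rest[8:]
--             if rest.startswith(("function ", "const ", "class ")):
--                 line = ws + rest
--         keep.append(line)
--     return "\n".join(keep)
-- ===== Notes on version B (the rewrite author's own statement) =====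
-- stated objective: alternative
-- what changed: B splits each line once into its whitespace prefix and body, tests the shared export-keyword prefix a single time and dispatches on the remainder, rebuilding kept lines by plain concatenation, instead of A's four full-prefix startswith tests each followed by a left-to-right first-occurrence str.replace scan.
import Mathlib
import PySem

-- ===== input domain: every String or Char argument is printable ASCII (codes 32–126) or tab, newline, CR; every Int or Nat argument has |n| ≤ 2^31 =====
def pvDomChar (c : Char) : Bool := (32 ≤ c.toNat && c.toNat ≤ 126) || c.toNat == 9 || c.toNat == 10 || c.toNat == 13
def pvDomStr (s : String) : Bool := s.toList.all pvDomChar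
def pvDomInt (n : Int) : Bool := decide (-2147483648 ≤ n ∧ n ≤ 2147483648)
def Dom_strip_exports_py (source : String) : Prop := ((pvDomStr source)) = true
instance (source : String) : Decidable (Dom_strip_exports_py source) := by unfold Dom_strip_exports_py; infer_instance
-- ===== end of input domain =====

-- B replaces A's four full-prefix `startswith`/`replace(...,1)` chain by splitting each line
-- into whitespace + body once, testing the shared "export " prefix a single time and
-- rebuilding the line by concatenation (objective: alternative decomposition, same cost).

-- ===== PORT A =====
-- Hand port of Python's str.replace(old, new, 1): replaces the FIRST occurrence of old
-- (scanning left to right), exact also for empty old (inserts new at the front).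
def pvReplaceOnce (old new : List Char) : List Char → List Char
  | [] => if PySem.Chars.startswith [] old then new ++ (([] : List Char).drop old.length) else []
  | c :: rest =>
    if PySem.Chars.startswith (c :: rest) old then new ++ ((c :: rest).drop old.length)
    else c :: pvReplaceOnce old new rest

-- the body of A's loop: some line' = append line', none = continue
def pvLineA (line : List Char) : Option (List Char) :=
  let stripped := PySem.Chars.lstrip line
  if PySem.Chars.startswith stripped "export function ".toList then
    some (pvReplaceOnce "export function ".toList "function ".toList line)
  else if PySem.Chars.startswith stripped "export default function ".toList then
    some (pvReplaceOnce "export default function ".toList "function ".toList line)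
  else if PySem.Chars.startswith stripped "export const ".toList then
    some (pvReplaceOnce "export const ".toList "const ".toList line)
  else if PySem.Chars.startswith stripped "export class ".toList then
    some (pvReplaceOnce "export class ".toList "class ".toList line)
  else if PySem.Chars.startswith stripped "export {".toList then
    none
  else some line

def strip_exports_py (source : String) : String :=
  let lines := PySem.Chars.splitOn source.toList "\n".toList
  let output_lines := lines.foldl
    (fun acc l => match pvLineA l with
      | none => acc
      | some l' => acc ++ [l']) []
  String.ofList (PySem.Chars.join "\n".toList output_lines)

-- ===== PORT B =====
-- the body of B's loop
def pvLineB (line : List Char) : Option (List Char) :=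
  let stripped := PySem.Chars.lstrip line
  let ws := PySem.Chars.slice line none
      (some (PySem.Chars.len line - PySem.Chars.len stripped))
  if PySem.Chars.startswith stripped "export ".toList then
    let rest := PySem.Chars.slice stripped (some 7) none
    if PySem.Chars.startswith rest "{".toList then
      none
    else
      let rest2 := if PySem.Chars.startswith rest "default function ".toList then
          PySem.Chars.slice rest (some 8) none
        else rest
      if PySem.Chars.startswith rest2 "function ".toList ||
         PySem.Chars.startswith rest2 "const ".toList ||
         PySem.Chars.startswith rest2 "class ".toList then
        some (ws ++ rest2)
      else some line
  else some line

def strip_exports_py_alt (source : String) : String :=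
  let lines := PySem.Chars.splitOn source.toList "\n".toList
  let keep := lines.foldl
    (fun acc l => match pvLineB l with
      | none => acc
      | some l' => acc ++ [l']) []
  String.ofList (PySem.Chars.join "\n".toList keep)

-- ===== PRECONDITION & SPEC =====
def Spec_strip_exports_py (source : String) (out : String) : Prop := out = strip_exports_py_alt source
instance (source : String) (out : String) : Decidable (Spec_strip_exports_py source out) := by unfold Spec_strip_exports_py; infer_instance

-- ===== CLAIM (what is proved, stated in full; the proofs are below) =====
def Claim_equal_strip_exports_py : Prop := ∀ (source : String), Dom_strip_exports_py source → Spec_strip_exports_py source (strip_exports_py source)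

-- ===== LEMMAS AND PROOFS =====

-- replace(old,new,1) on a line = whitespace ++ st where st starts with old (old's first
-- character is not whitespace, so the first occurrence is exactly at the end of the whitespace)
theorem pvReplaceOnce_ws (old new ws st : List Char)
    (hws : ∀ c ∈ ws, PySem.Chars.isspace c = true)
    (hone : old ≠ [])
    (hold : PySem.Chars.isspace (old.headD '!') = false)
    (hp : old <+: st) :
    pvReplaceOnce old new (ws ++ st) = ws ++ new ++ st.drop old.length := by
  match old, hone with
  | c0 :: ot, _ =>
  induction ws with
  | nil =>
    obtain ⟨t, ht⟩ := hp
    subst ht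
    simp only [List.nil_append, List.cons_append, pvReplaceOnce]
    rw [if_pos (by rw [PySem.Chars.startswith_iff]; exact ⟨t, by simp⟩)]
  | cons c ws' ih =>
    have hc : PySem.Chars.isspace c = true := hws c (List.mem_cons_self)
    have hne : ¬ ((c0 :: ot) <+: (c :: (ws' ++ st))) := by
      intro h
      rw [List.cons_prefix_cons] at h
      simp only [List.headD_cons] at hold
      rw [h.1] at hold
      rw [hold] at hc
      exact Bool.false_ne_true hc
    simp only [List.cons_append, pvReplaceOnce]
    rw [if_neg (by rw [PySem.Chars.startswith_iff]; exact hne)]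
    rw [ih (fun c hm => hws c (List.mem_cons_of_mem _ hm))]

theorem pvLine_eq (line : List Char) : pvLineA line = pvLineB line := by
  have hstr : PySem.Chars.lstrip line = line.dropWhile PySem.Chars.isspace := rfl
  set ws := line.takeWhile PySem.Chars.isspace with hwsdef
  set st := line.dropWhile PySem.Chars.isspace with hstdef
  have hline : line = ws ++ st := (List.takeWhile_append_dropWhile).symm
  have hws : ∀ c ∈ ws, PySem.Chars.isspace c = true := fun c hm =>
    List.mem_takeWhile_imp hm
  -- the `ws` computed by B is exactly the whitespace prefix of the line
  have hwsB : PySem.List.slice line none (some ((line.length : Int) - (st.length : Int))) = ws := by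
    have hlen : (line.length : Int) - (st.length : Int) = (ws.length : Int) := by
      conv_lhs => rw [hline]
      simp
    rw [hlen, PySem.List.slice_to line (by positivity)]
    conv_lhs => rw [hline]
    simp
  by_cases hex : "export ".toList <+: st
  · obtain ⟨r, hr⟩ := hex
    -- B's rest = st[7:] = r
    have hrest : PySem.List.slice st (some 7) none = r := by
      rw [PySem.List.slice_from st (by norm_num), ← hr]
      simp
    have ce : "export ".toList <+: st := ⟨r, hr⟩
    have c1 : (("export function ".toList : List Char) <+: st) ↔ ("function ".toList <+: r) := by
      rw [← hr, show ("export function ".toList : List Char)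
        = "export ".toList ++ "function ".toList from by decide]
      exact List.prefix_append_right_inj _
    have c2 : (("export default function ".toList : List Char) <+: st)
        ↔ ("default function ".toList <+: r) := by
      rw [← hr, show ("export default function ".toList : List Char)
        = "export ".toList ++ "default function ".toList from by decide]
      exact List.prefix_append_right_inj _
    have c3 : (("export const ".toList : List Char) <+: st) ↔ ("const ".toList <+: r) := by
      rw [← hr, show ("export const ".toList : List Char)
        = "export ".toList ++ "const ".toList from by decide]
      exact List.prefix_append_right_inj _
    have c4 : (("export class ".toList : List Char) <+: st) ↔ ("class ".toList <+: r) := by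
      rw [← hr, show ("export class ".toList : List Char)
        = "export ".toList ++ "class ".toList from by decide]
      exact List.prefix_append_right_inj _
    have c5 : (("export {".toList : List Char) <+: st) ↔ ("{".toList <+: r) := by
      rw [← hr, show ("export {".toList : List Char)
        = "export ".toList ++ "{".toList from by decide]
      exact List.prefix_append_right_inj _
    -- two incomparable lists cannot both be prefixes of r
    have disj : ∀ p q : List Char, p <+: r → ¬ (p <+: q) → ¬ (q <+: p) → ¬ (q <+: r) := by
      intro p q hp hpq hqp hq
      rcases List.prefix_or_prefix_of_prefix hp hq with h | h
      · exact hpq h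
      · exact hqp h
    have hst16 : st.drop 16 = r.drop 9 := by
      rw [← hr]; rfl
    have hst24 : st.drop 24 = r.drop 17 := by
      rw [← hr]; rfl
    have hst13 : st.drop 13 = r.drop 6 := by
      rw [← hr]; rfl
    simp only [pvLineA, pvLineB, hstr]
    by_cases hbr : "{".toList <+: r
    · have h1 : ¬ ("function ".toList <+: r) := disj _ _ hbr (by decide) (by decide)
      have h2 : ¬ ("default function ".toList <+: r) := disj _ _ hbr (by decide) (by decide)
      have h3 : ¬ ("const ".toList <+: r) := disj _ _ hbr (by decide) (by decide)
      have h4 : ¬ ("class ".toList <+: r) := disj _ _ hbr (by decide) (by decide)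
      simp at ce c1 c2 c3 c4 c5 hbr h1 h2 h3 h4 hrest
      simp [PySem.Chars.startswith_iff, ce, c1, c2, c3, c4, c5, hrest, hbr, h1, h2, h3, h4]
    · by_cases hd : "default function ".toList <+: r
      · have h1 : ¬ ("function ".toList <+: r) := disj _ _ hd (by decide) (by decide)
        obtain ⟨t, ht⟩ := hd
        have hA : pvReplaceOnce "export default function ".toList "function ".toList line
            = ws ++ "function ".toList ++ st.drop 24 := by
          conv_lhs => rw [hline]
          exact pvReplaceOnce_ws _ _ ws st hws (by decide) (by decide) (c2.mpr ⟨t, ht⟩)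
        have hr8 : r.drop 8 = "function ".toList ++ t := by
          rw [← ht]; rfl
        have hr17 : r.drop 17 = t := by
          rw [← ht]; rfl
        have hd' : "default function ".toList <+: r := ⟨t, ht⟩
        have hrest8 : PySem.List.slice r (some 8) none = r.drop 8 := by
          rw [PySem.List.slice_from r (by norm_num)]; rfl
        simp at ce c1 c2 c3 c4 c5 hrest h1 hd' hA hr8 hr17 hrest8 hbr ⊢
        simp [PySem.Chars.startswith_iff, ce, c1, c2, hrest, h1, hd', hA,
          hst24, hr17, hr8, hrest8, hwsB, hbr]
      · by_cases hf : "function ".toList <+: r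
        · obtain ⟨t, ht⟩ := hf
          have hA : pvReplaceOnce "export function ".toList "function ".toList line
              = ws ++ "function ".toList ++ st.drop 16 := by
            conv_lhs => rw [hline]
            exact pvReplaceOnce_ws _ _ ws st hws (by decide) (by decide) (c1.mpr ⟨t, ht⟩)
          have hf' : "function ".toList <+: r := ⟨t, ht⟩
          have hr9 : r.drop 9 = t := by
            rw [← ht]; rfl
          simp at ce c1 hrest hf' hA hr9 hbr hd ⊢
          simp [PySem.Chars.startswith_iff, ce, c1, hrest, hA, hst16, hwsB, ← ht]
        · by_cases hc : "const ".toList <+: r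
          · obtain ⟨t, ht⟩ := hc
            have h2 : ¬ ("default function ".toList <+: r) := hd
            have hA : pvReplaceOnce "export const ".toList "const ".toList line
                = ws ++ "const ".toList ++ st.drop 13 := by
              conv_lhs => rw [hline]
              exact pvReplaceOnce_ws _ _ ws st hws (by decide) (by decide) (c3.mpr ⟨t, ht⟩)
            have hc' : "const ".toList <+: r := ⟨t, ht⟩
            have hr6 : r.drop 6 = t := by
              rw [← ht]; rfl
            simp at ce c1 c2 c3 hrest hc' hA hr6 hbr hd hf ⊢
            simp [PySem.Chars.startswith_iff, ce, c1, c2, c3, hrest, hA, hst13,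
              hwsB, ← ht]
          · by_cases hk : "class ".toList <+: r
            · obtain ⟨t, ht⟩ := hk
              have hA : pvReplaceOnce "export class ".toList "class ".toList line
                  = ws ++ "class ".toList ++ st.drop 13 := by
                conv_lhs => rw [hline]
                exact pvReplaceOnce_ws _ _ ws st hws (by decide) (by decide) (c4.mpr ⟨t, ht⟩)
              have hk' : "class ".toList <+: r := ⟨t, ht⟩
              have hr6 : r.drop 6 = t := by
                rw [← ht]; rfl
              simp at ce c1 c2 c3 c4 hrest hk' hA hr6 hbr hd hf hc ⊢
              simp [PySem.Chars.startswith_iff, ce, c1, c2, c3, c4, hrest, hA, hst13,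
                hwsB, ← ht]
            · simp at ce c1 c2 c3 c4 c5 hrest hbr hd hf hc hk ⊢
              simp [PySem.Chars.startswith_iff, ce, c1, c2, c3, c4, c5, hrest, hbr, hd,
                hf, hc, hk]
  · -- no "export " prefix: every branch of A and B keeps the line unchanged
    have h1 : ¬ ("export function ".toList <+: st) := fun h =>
      hex ((by decide : "export ".toList <+: "export function ".toList).trans h)
    have h2 : ¬ ("export default function ".toList <+: st) := fun h =>
      hex ((by decide : "export ".toList <+: "export default function ".toList).trans h)
    have h3 : ¬ ("export const ".toList <+: st) := fun h =>
      hex ((by decide : "export ".toList <+: "export const ".toList).trans h)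
    have h4 : ¬ ("export class ".toList <+: st) := fun h =>
      hex ((by decide : "export ".toList <+: "export class ".toList).trans h)
    have h5 : ¬ ("export {".toList <+: st) := fun h =>
      hex ((by decide : "export ".toList <+: "export {".toList).trans h)
    simp only [pvLineA, pvLineB, hstr]
    simp at h1 h2 h3 h4 h5 hex
    simp [PySem.Chars.startswith_iff, h1, h2, h3, h4, h5, hex]

-- ===== VERDICT (by name: the statement is the Claim_ definition above) =====
theorem strip_exports_py_spec : Claim_equal_strip_exports_py := by
  intro source _
  unfold Spec_strip_exports_py strip_exports_py strip_exports_py_alt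
  simp only [funext pvLine_eq]
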